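-- pv_equiv track=rewrite | github.com/Stefsharon/Binario-Balanceados-TP | tp1-templates/binario_balanceado.py | es_binario_balanceado
-- ===== SOURCE A (Python) =====
-- def decimal_a_binario(n:int) -> str:
--     '''
--     Requiere: que n sea un número natural (positivo).
--     Devuelve: el resultado de convertir a n
--        de decimal a binario, es decir primero aplicarle
--        base 2 a n y agarrar el resto de izquierda
--        a derecha.
--     '''
--     vr:str=''
--     while n > 0:
--         vr = (str(n%2)) + vr
--         n=n//2
--     return vr
--
-- def es_binario_balanceado(n:int)->bool:
--     '''Requiere: que n pertenezca a los números naturales.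
--        Devuelve: True si n contiene la misma cantidad de 0's y
--        1's y False en caso contrario.
--     '''
--     i:int=0
--     vr:bool= True
--     conversión_n:str= decimal_a_binario(n)
--     contador_ceros:int = 0
--     contador_unos:int = 0
--     #A
--     while i < (len(conversión_n)):
--                     #B
--         if conversión_n[i] == '0':
--             contador_ceros = contador_ceros + 1
--         else:
--             contador_unos= contador_unos + 1
--         i = i  + 1
--         #C
--     #D
--     if contador_ceros == contador_unos:
--         vr = True
--     else:
--         vr = False
--     return vr
-- ===== SOURCE B (Python) =====
-- def es_binario_balanceado(n: int) -> bool: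
--     '''Single-pass bit scan: +1 per one-bit, -1 per zero-bit; balanced iff 0.'''
--     balance = 0
--     while n > 0:
--         if n % 2 == 1:
--             balance += 1
--         else:
--             balance -= 1
--         n //= 2
--     return balance == 0
-- ===== Notes on version B (the rewrite author's own statement) =====
-- stated objective: simpler
-- what changed: Fuses A's two passes (build the binary string, then scan it counting zeros and ones) into one arithmetic loop over the bits maintaining a single balance counter, with no string construction at all.
import Mathlib
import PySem

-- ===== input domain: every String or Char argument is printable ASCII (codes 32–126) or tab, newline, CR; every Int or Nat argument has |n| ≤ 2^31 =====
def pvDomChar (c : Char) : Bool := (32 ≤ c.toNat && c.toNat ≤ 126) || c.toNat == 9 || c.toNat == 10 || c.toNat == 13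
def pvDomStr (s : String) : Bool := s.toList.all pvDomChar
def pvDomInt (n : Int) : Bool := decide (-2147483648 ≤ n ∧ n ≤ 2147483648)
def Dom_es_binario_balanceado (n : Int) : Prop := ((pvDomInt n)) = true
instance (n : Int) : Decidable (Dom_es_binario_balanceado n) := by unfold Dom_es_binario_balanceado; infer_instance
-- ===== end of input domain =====

-- B replaces A's build-a-binary-string-then-scan-it with a single arithmetic pass
-- over the bits maintaining one balance counter (objective: simpler).


-- ===== PORT A =====
-- while n > 0: vr = str(n%2) + vr; n = n//2   (string kept as List Char)
def dab_loop (n : Int) (vr : List Char) : List Char :=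
  if _h : n > 0 then
    dab_loop (PySem.Int.floordiv n 2) (PySem.Int.toChars (PySem.Int.mod n 2) ++ vr)
  else vr
termination_by n.toNat
decreasing_by
  rw [PySem.Int.floordiv_eq_ediv_of_pos (by omega : (0:Int) < 2)]
  omega

def decimal_a_binario (n : Int) : List Char := dab_loop n []

-- while i < len(s): if s[i] == '0': ceros += 1 else: unos += 1; i += 1
-- (the index-increment scan is transcribed as the structural walk over the chars in order)
def cuenta_loop : List Char → Int → Int → Int × Int
  | [], ceros, unos => (ceros, unos)
  | ch :: rest, ceros, unos =>
    if ch = '0' then cuenta_loop rest (ceros + 1) unos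
    else cuenta_loop rest ceros (unos + 1)

def es_binario_balanceado (n : Int) : Bool :=
  let conv := decimal_a_binario n
  let cu := cuenta_loop conv 0 0
  if cu.1 = cu.2 then true else false

-- ===== PORT B =====
-- while n > 0: balance += 1 if n % 2 == 1 else -1; n //= 2
def bal_loop (n : Int) (balance : Int) : Int :=
  if _h : n > 0 then
    bal_loop (PySem.Int.floordiv n 2)
      (if PySem.Int.mod n 2 = 1 then balance + 1 else balance - 1)
  else balance
termination_by n.toNat
decreasing_by
  rw [PySem.Int.floordiv_eq_ediv_of_pos (by omega : (0:Int) < 2)]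
  omega

def es_binario_balanceado_alt (n : Int) : Bool :=
  decide (bal_loop n 0 = 0)

-- ===== PRECONDITION & SPEC =====
def Spec_es_binario_balanceado (n : Int) (out : Bool) : Prop := out = es_binario_balanceado_alt n
instance (n : Int) (out : Bool) : Decidable (Spec_es_binario_balanceado n out) := by unfold Spec_es_binario_balanceado; infer_instance

-- ===== CLAIM (what is proved, stated in full; the proofs are below) =====
def Claim_equal_es_binario_balanceado : Prop := ∀ (n : Int), Dom_es_binario_balanceado n → Spec_es_binario_balanceado n (es_binario_balanceado n)

-- ===== LEMMAS AND PROOFS =====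

-- counts of '0' and non-'0' characters, as Int
def cz (l : List Char) : Int := (l.countP (· = '0') : Int)
def cu (l : List Char) : Int := (l.countP (· ≠ '0') : Int)

theorem cuenta_loop_eq : ∀ (l : List Char) (c u : Int),
    cuenta_loop l c u = (c + cz l, u + cu l) := by
  intro l
  induction l with
  | nil => intro c u; simp [cuenta_loop, cz, cu]
  | cons ch rest ih =>
    intro c u
    by_cases h : ch = '0' <;>
      simp [cuenta_loop, h, ih, cz, cu] <;> ring

theorem dab_neg (n : Int) (vr : List Char) (h : ¬ n > 0) : dab_loop n vr = vr := by
  rw [dab_loop]; simp [h]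

theorem dab_pos (n : Int) (vr : List Char) (h : n > 0) :
    dab_loop n vr = dab_loop (PySem.Int.floordiv n 2) (PySem.Int.toChars (PySem.Int.mod n 2) ++ vr) := by
  rw [dab_loop]; simp [h]

theorem dab_loop_append : ∀ (k : Nat) (n : Int), n.toNat ≤ k → ∀ (vr : List Char),
    dab_loop n vr = dab_loop n [] ++ vr := by
  intro k
  induction k with
  | zero =>
    intro n hn vr
    have h : ¬ n > 0 := by omega
    rw [dab_neg n vr h, dab_neg n [] h]
    simp
  | succ k ih =>
    intro n hn vr
    by_cases h : n > 0
    · have h2 : PySem.Int.floordiv n 2 = n / 2 :=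
        PySem.Int.floordiv_eq_ediv_of_pos (by omega)
      have hk : (PySem.Int.floordiv n 2).toNat ≤ k := by rw [h2]; omega
      rw [dab_pos n vr h, dab_pos n [] h, ih _ hk, ih _ hk (PySem.Int.toChars (PySem.Int.mod n 2) ++ [])]
      simp
    · rw [dab_neg n vr h, dab_neg n [] h]; simp

theorem bal_loop_eq : ∀ (k : Nat) (n : Int), n.toNat ≤ k → ∀ (b : Int),
    bal_loop n b = b + cu (dab_loop n []) - cz (dab_loop n []) := by
  intro k
  induction k with
  | zero =>
    intro n hn b
    have h : ¬ n > 0 := by omega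
    rw [bal_loop, dab_neg n [] h]
    simp [h, cz, cu]
  | succ k ih =>
    intro n hn b
    rw [bal_loop]
    by_cases h : n > 0
    · simp only [h, dif_pos]
      rw [dab_pos n [] h]
      have h2 : PySem.Int.floordiv n 2 = n / 2 :=
        PySem.Int.floordiv_eq_ediv_of_pos (by omega)
      have hk : (PySem.Int.floordiv n 2).toNat ≤ k := by rw [h2]; omega
      have hm01 : PySem.Int.mod n 2 = 0 ∨ PySem.Int.mod n 2 = 1 := by
        have h1 := PySem.Int.mod_nonneg n (b := 2) (by omega)
        have h3 := PySem.Int.mod_lt n (b := 2) (by omega)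
        omega
      rw [dab_loop_append (PySem.Int.floordiv n 2).toNat _ le_rfl (PySem.Int.toChars (PySem.Int.mod n 2) ++ [])]
      rcases hm01 with hm | hm
      · rw [hm]
        have hd : PySem.Int.toChars (0 : Int) = ['0'] := by decide
        rw [hd, ih _ hk]
        simp [cz, cu]
        ring
      · rw [hm]
        have hd : PySem.Int.toChars (1 : Int) = ['1'] := by decide
        rw [hd, ih _ hk]
        simp [cz, cu]
        ring
    · rw [dab_neg n [] h]; simp [h, cz, cu]

-- ===== VERDICT (by name: the statement is the Claim_ definition above) =====
theorem es_binario_balanceado_spec : Claim_equal_es_binario_balanceado := by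
  intro n _
  unfold Spec_es_binario_balanceado es_binario_balanceado es_binario_balanceado_alt
  rw [bal_loop_eq n.toNat n le_rfl 0]
  simp only [decimal_a_binario, cuenta_loop_eq]
  by_cases h : cz (dab_loop n []) = cu (dab_loop n []) <;> simp [h] <;> omega
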